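-- pv_equiv track=rewrite | github.com/Vladislav-Antipin/Project_LU2SV483 | Project_Library/basic_seq_analysis.py | ORF_position
-- ===== SOURCE A (Python) =====
-- def ORF_position(seq):
--     ''' str -> List[int],List[int]
--     Assumption: seq is a nucleotide sequence
--     Returns the positions (starting from 0) of ATG and STOP (TGA, TAA, TAG)
--     for a given strand
--     '''
--     # ATGs : List[int] ; a list of positions of ATG
--     ATGs = []
--     # STOPs : List[int] ; a list of positions of ATG
--     STOPs = []
--     # i : int ; index in a sequence
--     for i in range(len(seq)-2):
--         if seq[i:i+3]=='ATG':
--             ATGs.append(i)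
--         elif seq[i:i+3] in {'TGA','TAA','TAG'}:
--             STOPs.append(i)
--     return ATGs, STOPs
-- ===== SOURCE B (Python) =====
-- def ORF_position(seq):
--     ''' str -> List[int],List[int]
--     Same result as A: positions of ATG and of STOP codons (TGA, TAA, TAG),
--     each list in ascending order.
--     '''
--     def find_all(sub):
--         out = []
--         start = 0
--         while True:
--             pos = seq.find(sub, start)
--             if pos == -1:
--                 return out
--             out.append(pos)
--             start = pos + 1
--     ATGs = find_all('ATG')
--     STOPs = sorted(find_all('TGA') + find_all('TAA') + find_all('TAG'))
--     return ATGs, STOPs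
-- ===== Notes on version B (the rewrite author's own statement) =====
-- stated objective: faster
-- what changed: A makes one positional sweep testing the 3-char slice at every index against four codons; B instead runs a repeated str.find loop per codon (C-level substring search, advancing start by 1) and merges the three STOP position lists with a sort.
import Mathlib
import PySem

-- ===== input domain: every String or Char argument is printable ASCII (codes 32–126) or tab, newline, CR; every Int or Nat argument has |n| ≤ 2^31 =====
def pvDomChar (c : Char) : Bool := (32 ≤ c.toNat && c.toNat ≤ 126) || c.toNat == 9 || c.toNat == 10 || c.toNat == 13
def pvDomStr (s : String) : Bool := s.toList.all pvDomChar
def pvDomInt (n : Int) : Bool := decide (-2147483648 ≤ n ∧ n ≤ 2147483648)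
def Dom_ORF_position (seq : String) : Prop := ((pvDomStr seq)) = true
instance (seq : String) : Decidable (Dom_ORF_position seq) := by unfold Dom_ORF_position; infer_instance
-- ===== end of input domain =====

-- B replaces A's positional sweep by one str.find loop per codon plus a sort-merge of the three STOP lists (objective: faster by constant factor, measured).

-- ===== PORT A =====
-- single sweep i = 0 .. len(seq)-3, testing the 3-char slice at each position
def ORF_position (seq : String) : List Int × List Int :=
  (PySem.List.pyRange 0 ((seq.toList.length : Int) - 2)).foldl
    (fun (acc : List Int × List Int) i =>
      if PySem.Chars.slice seq.toList (some i) (some (i + 3)) = "ATG".toList then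
        (acc.1 ++ [i], acc.2)
      else if PySem.Chars.slice seq.toList (some i) (some (i + 3)) ∈
          ["TGA".toList, "TAA".toList, "TAG".toList] then
        (acc.1, acc.2 ++ [i])
      else acc)
    ([], [])

-- ===== PORT B =====
-- termination facts for the find loop (cited by pvFindAllAux's decreasing_by)
theorem pvFindFrom_gt_len (s sub : List Char) (k : Nat) (hk : s.length < k) :
    PySem.Chars.findFrom s sub (k : Int) none = -1 := by
  simp only [PySem.Chars.findFrom]
  have h1 : ¬ ((k:Int) < 0) := by omega
  have h2 : (s.length : Int) < (k : Int) := by exact_mod_cast hk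
  simp [h1, h2]

theorem pvFindFrom_bounds (s sub : List Char) (k : Nat)
    (h : PySem.Chars.findFrom s sub (k : Int) none ≠ -1) :
    k ≤ (PySem.Chars.findFrom s sub (k : Int) none).toNat ∧
      (PySem.Chars.findFrom s sub (k : Int) none).toNat ≤ s.length := by
  by_cases hk : k ≤ s.length
  · rw [PySem.Chars.findFrom_natCast s sub k hk] at h ⊢
    have hf : PySem.Chars.find (List.drop k s) sub ≠ -1 := by
      intro he; simp [he] at h
    have h1 := PySem.Chars.neg_one_le_find (List.drop k s) sub
    have h2 := PySem.Chars.find_le_length (List.drop k s) sub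
    rw [List.length_drop] at h2
    rw [if_neg hf]
    have hkk : ((s.length - k : Nat) : Int) = (s.length : Int) - k := by omega
    rw [hkk] at h2
    omega
  · exact absurd (pvFindFrom_gt_len s sub k (by omega)) h

-- the 'while True: pos = seq.find(sub, start); …; start = pos + 1' loop of Source B
def pvFindAllAux (s sub : List Char) (start : Nat) : List Int :=
  if h : PySem.Chars.findFrom s sub (start : Int) none = -1 then []
  else
    PySem.Chars.findFrom s sub (start : Int) none ::
      pvFindAllAux s sub ((PySem.Chars.findFrom s sub (start : Int) none).toNat + 1)
termination_by s.length + 1 - start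
decreasing_by
  have := pvFindFrom_bounds s sub start h
  omega

def ORF_position_alt (seq : String) : List Int × List Int :=
  (pvFindAllAux seq.toList "ATG".toList 0,
   PySem.List.sorted
     (pvFindAllAux seq.toList "TGA".toList 0 ++ pvFindAllAux seq.toList "TAA".toList 0 ++
       pvFindAllAux seq.toList "TAG".toList 0)
     (fun x => x))

-- ===== PRECONDITION & SPEC =====
def Spec_ORF_position (seq : String) (out : List Int × List Int) : Prop := out = ORF_position_alt seq
instance (seq : String) (out : List Int × List Int) : Decidable (Spec_ORF_position seq out) := by unfold Spec_ORF_position; infer_instance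

-- ===== CLAIM (what is proved, stated in full; the proofs are below) =====
def Claim_equal_ORF_position : Prop := ∀ (seq : String), Dom_ORF_position seq → Spec_ORF_position seq (ORF_position seq)

-- ===== LEMMAS AND PROOFS =====

-- splitting a filtered range at the least matching position ≥ st
theorem pvFilter_range_split (n p st : Nat) (P : Nat → Prop) [DecidablePred P]
    (hp : P p) (hpn : p < n) (hst : st ≤ p)
    (hmin : ∀ i, st ≤ i → i < p → ¬ P i) :
    (List.range n).filter (fun i => decide (st ≤ i ∧ P i))
      = p :: (List.range n).filter (fun i => decide (p + 1 ≤ i ∧ P i)) := by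
  have he : List.range n = List.range (p + 1) ++ List.range' (p + 1) (n - (p + 1)) := by
    rw [List.range_eq_range', List.range_eq_range']
    rw [show n = (p + 1) + (n - (p + 1)) by omega, ← List.range'_append_1]
    simp
  rw [he, List.filter_append, List.filter_append]
  have h1 : (List.range (p + 1)).filter (fun i => decide (st ≤ i ∧ P i)) = [p] := by
    rw [List.range_succ, List.filter_append]
    have h1a : (List.range p).filter (fun i => decide (st ≤ i ∧ P i)) = [] := by
      apply List.filter_eq_nil_iff.2
      intro a ha hpa
      rw [List.mem_range] at ha
      rw [decide_eq_true_eq] at hpa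
      exact hmin a hpa.1 ha hpa.2
    rw [h1a]
    simp [hst, hp]
  have h2 : (List.range (p + 1)).filter (fun i => decide (p + 1 ≤ i ∧ P i)) = [] := by
    apply List.filter_eq_nil_iff.2
    intro a ha hpa
    rw [List.mem_range] at ha
    rw [decide_eq_true_eq] at hpa
    omega
  have h3 : (List.range' (p + 1) (n - (p + 1))).filter (fun i => decide (st ≤ i ∧ P i))
      = (List.range' (p + 1) (n - (p + 1))).filter (fun i => decide (p + 1 ≤ i ∧ P i)) := by
    apply List.filter_congr
    intro a ha
    rw [List.mem_range'_1] at ha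
    by_cases hPa : P a
    · simp [hPa]; omega
    · simp [hPa]
  rw [h1, h2, h3]
  simp

-- characterization of the find loop: the occurrence positions ≥ start, in ascending order
theorem pvFindAllAux_eq_aux (s sub : List Char) (hsub : sub ≠ []) :
    ∀ (fuel start : Nat), s.length + 1 - start ≤ fuel →
    pvFindAllAux s sub start =
      ((List.range s.length).filter
          (fun i => decide (start ≤ i ∧ sub <+: s.drop i))).map (fun k => Int.ofNat k) := by
  intro fuel
  induction fuel with
  | zero =>
    intro start hf
    have hst : s.length < start := by omega
    rw [pvFindAllAux, dif_pos (pvFindFrom_gt_len s sub start hst)]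
    have : (List.range s.length).filter (fun i => decide (start ≤ i ∧ sub <+: s.drop i)) = [] := by
      apply List.filter_eq_nil_iff.2
      intro a ha hpa
      rw [List.mem_range] at ha
      rw [decide_eq_true_eq] at hpa
      omega
    rw [this]; rfl
  | succ f ih =>
    intro start hf
    by_cases h : PySem.Chars.findFrom s sub (start : Int) none = -1
    · rw [pvFindAllAux, dif_pos h]
      have : (List.range s.length).filter (fun i => decide (start ≤ i ∧ sub <+: s.drop i)) = [] := by
        apply List.filter_eq_nil_iff.2
        intro a ha hpa
        rw [List.mem_range] at ha
        rw [decide_eq_true_eq] at hpa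
        by_cases hk : start ≤ s.length
        · have hno := (PySem.Chars.findFrom_natCast_eq_neg_one_iff s sub start hk).1 h
          apply hno
          rw [← PySem.Chars.isIn_iff_infix, ← PySem.Chars.exists_prefix_drop_iff_isIn]
          refine ⟨a - start, ?_⟩
          rw [List.drop_drop]
          have : start + (a - start) = a := by omega
          rw [this]
          exact hpa.2
        · omega
      rw [this]; rfl
    · rw [pvFindAllAux, dif_neg h]
      have hb := pvFindFrom_bounds s sub start h
      have hk : start ≤ s.length := by
        by_contra hk'
        exact h (pvFindFrom_gt_len s sub start (by omega))
      obtain ⟨hge, hpre, hmin⟩ := PySem.Chars.findFrom_natCast_spec s sub start hk h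
      set j := PySem.Chars.findFrom s sub (start : Int) none
      have hj0 : 0 ≤ j := le_trans (by omega) hge
      have hpn : j.toNat < s.length := by
        have hlen := hpre.length_le
        rw [List.length_drop] at hlen
        have hs1 : 1 ≤ sub.length := List.length_pos_iff.2 hsub
        omega
      have hge' : start ≤ j.toNat := by omega
      rw [pvFilter_range_split s.length j.toNat start (fun i => sub <+: s.drop i) hpre hpn hge'
        (fun i h1 h2 => hmin i h1 h2)]
      rw [List.map_cons]
      congr 1
      · exact_mod_cast (Int.toNat_of_nonneg hj0).symm
      · exact ih (j.toNat + 1) (by omega)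

theorem pvFindAllAux_eq (s sub : List Char) (hsub : sub ≠ []) (start : Nat) :
    pvFindAllAux s sub start =
      ((List.range s.length).filter
          (fun i => decide (start ≤ i ∧ sub <+: s.drop i))).map (fun k => Int.ofNat k) :=
  pvFindAllAux_eq_aux s sub hsub (s.length + 1 - start) start le_rfl

-- A's pyRange over ints is a Nat range
theorem pvPyRange_sub_two (n : Nat) :
    PySem.List.pyRange 0 ((n : Int) - 2) = (List.range (n - 2)).map (fun k => Int.ofNat k) := by
  by_cases hn : 2 ≤ n
  · have : ((n : Int) - 2) = ((n - 2 : Nat) : Int) := by omega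
    rw [this, PySem.List.pyRange_zero_natCast]
    rfl
  · have h1 : n - 2 = 0 := by omega
    rw [h1]
    apply List.eq_nil_iff_forall_not_mem.2
    intro x hx
    rw [PySem.List.mem_pyRange_one] at hx
    omega

-- disjoint filters concatenate to the filter of the disjunction, up to permutation
theorem pvFilter_append_perm_or {α : Type} (p q : α → Bool) (l : List α)
    (h : ∀ x ∈ l, ¬(p x = true ∧ q x = true)) :
    (l.filter p ++ l.filter q).Perm (l.filter (fun x => p x || q x)) := by
  induction l with
  | nil => simp
  | cons a t ih =>
    have iht := ih (fun x hx => h x (List.mem_cons_of_mem a hx))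
    by_cases hp : p a = true
    · have hq : q a = false := by
        by_contra h'; rw [Bool.not_eq_false] at h'
        exact h a (List.mem_cons_self ..) ⟨hp, h'⟩
      simp [hp, hq]
      exact iht
    · rw [Bool.not_eq_true] at hp
      by_cases hq : q a = true
      · simp only [List.filter_cons, hp, hq, Bool.false_or, if_pos]
        exact (List.perm_middle.trans (iht.cons a))
      · rw [Bool.not_eq_true] at hq
        simpa [List.filter_cons, hp, hq] using iht

-- a filter whose predicate forces i < m can be taken over the shorter range
theorem pvFilter_range_shrink (p : Nat → Bool) (m n : Nat) (hmn : m ≤ n)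
    (h : ∀ i, p i = true → i < m) :
    (List.range n).filter p = (List.range m).filter p := by
  have he : List.range n = List.range m ++ List.range' m (n - m) := by
    rw [List.range_eq_range', List.range_eq_range']
    rw [show n = m + (n - m) by omega, ← List.range'_append_1]
    simp
  rw [he, List.filter_append]
  have h2 : (List.range' m (n - m)).filter p = [] := by
    apply List.filter_eq_nil_iff.2
    intro a ha hpa
    rw [List.mem_range'_1] at ha
    exact absurd (h a hpa) (by omega)
  simp [h2]

-- a 3-character codon occurs at i only if i < len - 2
theorem pvPrefix_lt (s c : List Char) (hc : c.length = 3) (i : Nat) (h : c <+: s.drop i) :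
    i < s.length - 2 := by
  have hlen := h.length_le
  rw [List.length_drop, hc] at hlen
  omega

-- the slice seq[i:i+3] is take 3 (drop i)
theorem pvSlice_eq (s : List Char) (k : Nat) :
    PySem.Chars.slice s (some (Int.ofNat k)) (some (Int.ofNat k + 3)) = (s.drop k).take 3 := by
  have h3 : (Int.ofNat k) + 3 = ((k + 3 : Nat) : Int) := by
    show (k : Int) + 3 = ((k + 3 : Nat) : Int)
    push_cast
    ring
  rw [h3]
  show PySem.List.slice s (some ((k : Nat) : Int)) (some ((k + 3 : Nat) : Int)) = _
  rw [PySem.List.slice_natCast]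
  congr 1
  omega

-- a 3-character codon is a prefix of drop i iff the slice equals it
theorem pvPrefix_iff (s c : List Char) (hc : c.length = 3) (i : Nat) :
    c <+: s.drop i ↔ (s.drop i).take 3 = c := by
  rw [List.prefix_iff_eq_take, hc, eq_comm]

-- A evaluated: the two filtered ranges
theorem pvA_eval (seq : String) :
    ORF_position seq =
      (((List.range (seq.toList.length - 2)).filter
          (fun i => decide ("ATG".toList <+: seq.toList.drop i))).map (fun k => Int.ofNat k),
       ((List.range (seq.toList.length - 2)).filter
          (fun i => decide (("TGA".toList <+: seq.toList.drop i) ∨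
            ("TAA".toList <+: seq.toList.drop i) ∨
            ("TAG".toList <+: seq.toList.drop i)))).map (fun k => Int.ofNat k)) := by
  unfold ORF_position
  rw [pvPyRange_sub_two, List.foldl_map]
  have hbody : ∀ (acc : List Int × List Int) (k : Nat), k ∈ List.range (seq.toList.length - 2) →
      (if PySem.Chars.slice seq.toList (some (Int.ofNat k)) (some (Int.ofNat k + 3)) = "ATG".toList then
        (acc.1 ++ [Int.ofNat k], acc.2)
      else if PySem.Chars.slice seq.toList (some (Int.ofNat k)) (some (Int.ofNat k + 3)) ∈
          ["TGA".toList, "TAA".toList, "TAG".toList] then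
        (acc.1, acc.2 ++ [Int.ofNat k])
      else acc)
      = ((if ("ATG".toList <+: seq.toList.drop k) then acc.1 ++ [Int.ofNat k] else acc.1),
       (if (("TGA".toList <+: seq.toList.drop k) ∨ ("TAA".toList <+: seq.toList.drop k) ∨
            ("TAG".toList <+: seq.toList.drop k)) then acc.2 ++ [Int.ofNat k] else acc.2)) := by
    intro acc k hk
    rw [pvSlice_eq]
    simp only [List.mem_cons, List.not_mem_nil, or_false]
    have hA := pvPrefix_iff seq.toList "ATG".toList rfl k
    have hB := pvPrefix_iff seq.toList "TGA".toList rfl k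
    have hC := pvPrefix_iff seq.toList "TAA".toList rfl k
    have hD := pvPrefix_iff seq.toList "TAG".toList rfl k
    by_cases h1 : (seq.toList.drop k).take 3 = "ATG".toList
    · have hno : ¬ (("TGA".toList <+: seq.toList.drop k) ∨ ("TAA".toList <+: seq.toList.drop k) ∨
          ("TAG".toList <+: seq.toList.drop k)) := by
        rw [hB, hC, hD, h1]
        decide
      rw [if_pos h1, if_pos (hA.2 h1), if_neg hno]
    · have hA' : ¬ ("ATG".toList <+: seq.toList.drop k) := fun hh => h1 (hA.1 hh)
      rw [if_neg h1, if_neg hA']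
      by_cases h2 : (seq.toList.drop k).take 3 = "TGA".toList ∨
          (seq.toList.drop k).take 3 = "TAA".toList ∨ (seq.toList.drop k).take 3 = "TAG".toList
      · have hyes : ("TGA".toList <+: seq.toList.drop k) ∨ ("TAA".toList <+: seq.toList.drop k) ∨
            ("TAG".toList <+: seq.toList.drop k) := by
          rcases h2 with h2 | h2 | h2
          · exact Or.inl (hB.2 h2)
          · exact Or.inr (Or.inl (hC.2 h2))
          · exact Or.inr (Or.inr (hD.2 h2))
        rw [if_pos h2, if_pos hyes]
      · have hno : ¬ (("TGA".toList <+: seq.toList.drop k) ∨ ("TAA".toList <+: seq.toList.drop k) ∨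
            ("TAG".toList <+: seq.toList.drop k)) := by
          rw [hB, hC, hD]; exact h2
        rw [if_neg h2, if_neg hno]
  rw [PySem.List.foldl_congr_mem _ _ _ _ hbody]
  rw [PySem.List.foldl_prod_mk
      (f := fun (a : List Int) (k : Nat) =>
        if ("ATG".toList <+: seq.toList.drop k) then a ++ [Int.ofNat k] else a)
      (g := fun (a : List Int) (k : Nat) =>
        if (("TGA".toList <+: seq.toList.drop k) ∨ ("TAA".toList <+: seq.toList.drop k) ∨
            ("TAG".toList <+: seq.toList.drop k)) then a ++ [Int.ofNat k] else a)]
  rw [PySem.List.foldl_append_ite (p := fun k => ("ATG".toList <+: seq.toList.drop k))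
    (f := fun k => Int.ofNat k)]
  rw [PySem.List.foldl_append_ite
    (p := fun k => ("TGA".toList <+: seq.toList.drop k) ∨ ("TAA".toList <+: seq.toList.drop k) ∨
      ("TAG".toList <+: seq.toList.drop k))
    (f := fun k => Int.ofNat k)]
  simp
-- one find-loop evaluated over the shorter range, with the trivial 0 ≤ i dropped
theorem pvB_findAll (s c : List Char) (hc : c.length = 3) :
    pvFindAllAux s c 0 =
      ((List.range (s.length - 2)).filter
          (fun i => decide (c <+: s.drop i))).map (fun k => Int.ofNat k) := by
  have hne : c ≠ [] := by intro h; rw [h] at hc; simp at hc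
  rw [pvFindAllAux_eq s c hne 0]
  congr 1
  have h0 : ∀ i ∈ List.range s.length,
      (decide (0 ≤ i ∧ c <+: s.drop i)) = (decide (c <+: s.drop i)) := by
    intro i _
    simp
  rw [List.filter_congr h0]
  exact pvFilter_range_shrink _ _ _ (by omega) (fun i hi => pvPrefix_lt s c hc i (by simpa using hi))

-- ===== VERDICT (by name: the statement is the Claim_ definition above) =====
theorem ORF_position_spec : Claim_equal_ORF_position := by
  intro seq _
  unfold Spec_ORF_position
  rw [pvA_eval]
  unfold ORF_position_alt
  rw [pvB_findAll seq.toList "ATG".toList rfl, pvB_findAll seq.toList "TGA".toList rfl,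
    pvB_findAll seq.toList "TAA".toList rfl, pvB_findAll seq.toList "TAG".toList rfl]
  have hB := pvPrefix_iff seq.toList "TGA".toList rfl
  have hC := pvPrefix_iff seq.toList "TAA".toList rfl
  have hD := pvPrefix_iff seq.toList "TAG".toList rfl
  congr 1
  refine (PySem.List.sorted_eq_of_perm_of_pairwise_lt _ _ (fun x => x) ?_ ?_).symm
  · rw [← List.map_append, ← List.map_append]
    apply List.Perm.map
    refine List.Perm.symm ?_
    have hdisj1 : ∀ i ∈ List.range (seq.toList.length - 2),
        ¬((decide ("TGA".toList <+: seq.toList.drop i) = true) ∧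
          (decide ("TAA".toList <+: seq.toList.drop i) = true)) := by
      intro i _ ⟨u, v⟩
      rw [decide_eq_true_eq, hB i] at u
      rw [decide_eq_true_eq, hC i] at v
      rw [u] at v
      exact absurd v (by decide)
    have hdisj2 : ∀ i ∈ List.range (seq.toList.length - 2),
        ¬(((decide ("TGA".toList <+: seq.toList.drop i) ||
            decide ("TAA".toList <+: seq.toList.drop i)) = true) ∧
          (decide ("TAG".toList <+: seq.toList.drop i) = true)) := by
      intro i _ ⟨u, v⟩
      rw [decide_eq_true_eq, hD i] at v
      rcases Bool.or_eq_true_iff.1 u with u' | u'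
      · rw [decide_eq_true_eq, hB i] at u'
        rw [u'] at v
        exact absurd v (by decide)
      · rw [decide_eq_true_eq, hC i] at u'
        rw [u'] at v
        exact absurd v (by decide)
    have hab := pvFilter_append_perm_or
      (fun i => decide ("TGA".toList <+: seq.toList.drop i))
      (fun i => decide ("TAA".toList <+: seq.toList.drop i))
      (List.range (seq.toList.length - 2)) hdisj1
    have habc := pvFilter_append_perm_or
      (fun i => decide ("TGA".toList <+: seq.toList.drop i) ||
        decide ("TAA".toList <+: seq.toList.drop i))
      (fun i => decide ("TAG".toList <+: seq.toList.drop i))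
      (List.range (seq.toList.length - 2)) hdisj2
    have heq : (List.range (seq.toList.length - 2)).filter
        (fun i => (decide ("TGA".toList <+: seq.toList.drop i) ||
          decide ("TAA".toList <+: seq.toList.drop i)) ||
          decide ("TAG".toList <+: seq.toList.drop i))
        = (List.range (seq.toList.length - 2)).filter
          (fun i => decide (("TGA".toList <+: seq.toList.drop i) ∨
            ("TAA".toList <+: seq.toList.drop i) ∨ ("TAG".toList <+: seq.toList.drop i))) := by
      apply List.filter_congr
      intro i _
      rw [Bool.eq_iff_iff]
      simp only [Bool.or_eq_true, decide_eq_true_eq]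
      tauto
    exact ((hab.append_right _).trans habc).trans (heq ▸ List.Perm.refl _)
  · rw [List.pairwise_map]
    have hp : List.Pairwise (fun a b : Nat => a < b) (List.range (seq.toList.length - 2)) :=
      List.pairwise_lt_range
    exact (hp.filter _).imp (fun hlt => Int.ofNat_lt.2 hlt)
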